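-- pv_equiv track=rewrite | github.com/Karina-Podgornova/Karina_P_PaCoPL | RK2/main.py | second_task
-- ===== SOURCE A (Python) =====
-- from operator import itemgetter
--
-- def second_task(cond_list):
--     res2 = []
--     temp_dict = {}
--     for i in cond_list:
--         if i[2] in temp_dict:
--             temp_dict[i[2]] += 1
--         else:
--             temp_dict[i[2]] = 1
--     for i in temp_dict.keys():
--         res2.append((i, temp_dict[i]))
--
--     res2.sort(key=itemgetter(1), reverse=True)
--     return res2
-- ===== SOURCE B (Python) =====
-- def second_task(cond_list):
--     counts = {}
--     for i in cond_list:
--         counts[i[2]] = counts.get(i[2], 0) + 1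
--     if not counts:
--         return []
--     buckets = {}
--     for k, c in counts.items():
--         buckets.setdefault(c, []).append(k)
--     res = []
--     for c in range(max(counts.values()), 0, -1):
--         for k in buckets.get(c, ()):
--             res.append((k, c))
--     return res
-- ===== Notes on version B (the rewrite author's own statement) =====
-- stated objective: alternative
-- what changed: The comparison sort of the (key, count) pairs is replaced by a counting/bucket sort: keys are grouped into buckets keyed by their count (preserving dict insertion order) and the buckets are emitted from the maximum count down to 1, which reproduces the stable reverse sort without comparing pairs.
import Mathlib
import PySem

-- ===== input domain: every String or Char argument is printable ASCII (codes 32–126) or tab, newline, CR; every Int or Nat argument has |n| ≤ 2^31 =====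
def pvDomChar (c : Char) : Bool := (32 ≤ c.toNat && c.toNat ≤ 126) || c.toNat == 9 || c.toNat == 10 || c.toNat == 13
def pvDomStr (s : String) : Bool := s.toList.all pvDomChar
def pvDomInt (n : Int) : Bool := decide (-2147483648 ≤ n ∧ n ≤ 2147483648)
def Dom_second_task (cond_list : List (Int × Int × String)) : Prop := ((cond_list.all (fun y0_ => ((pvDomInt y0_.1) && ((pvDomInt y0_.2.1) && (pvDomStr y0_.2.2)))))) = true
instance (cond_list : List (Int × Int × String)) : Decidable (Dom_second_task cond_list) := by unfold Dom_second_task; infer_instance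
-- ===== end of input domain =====

-- B replaces A's comparison sort of the (key, count) pairs by a counting/bucket sort on the
-- frequencies (buckets keyed by count, emitted from the maximum count down); same return value.

-- ===== PORT A =====
-- literal port of A: count dict (membership test, then increment or initial 1), the items list
-- built by iterating keys (temp_dict[i] is exact as getD i 0 since i is a key, so no KeyError),
-- then a stable reverse sort by the second component.
def second_task (cond_list : List (Int × Int × String)) : List (String × Int) :=
  let temp_dict := cond_list.foldl (fun d i =>
      if d.contains i.2.2 then d.insert i.2.2 (d.getD i.2.2 0 + 1)
      else d.insert i.2.2 1) PySem.Dict.empty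
  let res2 := temp_dict.keys.foldl (fun r i => r ++ [(i, temp_dict.getD i 0)]) ([] : List (String × Int))
  PySem.List.sorted res2 (fun p => p.2) true

-- ===== PORT B =====
-- literal port of Source B: counts via dict.get, buckets[count] key lists via setdefault/append
-- (= Dict.modify), then emit (key, c) for c from max(counts.values(), default=0) down to 1.
def second_task_alt (cond_list : List (Int × Int × String)) : List (String × Int) :=
  let counts := cond_list.foldl (fun d i => d.insert i.2.2 (d.getD i.2.2 0 + 1)) PySem.Dict.empty
  let buckets := counts.items.foldl (fun b p => b.modify p.2 ([] : List String) (fun l => l ++ [p.1])) PySem.Dict.empty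
  (PySem.List.pyRange ((PySem.List.max? counts.values (fun v => v)).getD 0) 0 (-1)).foldl
    (fun r c => (buckets.getD c ([] : List String)).foldl (fun r k => r ++ [(k, c)]) r) []

-- ===== PRECONDITION & SPEC =====
def Spec_second_task (cond_list : List (Int × Int × String)) (out : List (String × Int)) : Prop := out = second_task_alt cond_list
instance (cond_list : List (Int × Int × String)) (out : List (String × Int)) : Decidable (Spec_second_task cond_list out) := by unfold Spec_second_task; infer_instance

-- ===== CLAIM (what is proved, stated in full; the proofs are below) =====
def Claim_equal_second_task : Prop := ∀ (cond_list : List (Int × Int × String)), Dom_second_task cond_list → Spec_second_task cond_list (second_task cond_list)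

-- ===== LEMMAS AND PROOFS =====

-- a fold appending one image per element is map
theorem pv_foldl_app {α β : Type} (g : α → β) (xs : List α) : ∀ r : List β, xs.foldl (fun r k => r ++ [g k]) r = r ++ xs.map g := by
  induction xs with
  | nil => simp
  | cons x xs ih => intro r; simp [List.foldl_cons, ih]

-- a fold appending one block per element is flatMap
theorem pv_foldl_flatMap {α β : Type} (g : α → List β) (xs : List α) : ∀ r : List β, xs.foldl (fun r c => r ++ g c) r = r ++ xs.flatMap g := by
  induction xs with
  | nil => simp
  | cons x xs ih => intro r; simp [List.foldl_cons, ih]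

theorem pv_getD_of_not_contains {κ ν : Type} [BEq κ] (d : PySem.Dict κ ν) (k : κ) (v : ν)
    (h : d.contains k = false) : d.getD k v = v := by
  simp [PySem.Dict.getD, PySem.Dict.get?, PySem.Dict.contains, List.any_eq_false] at *
  rw [List.find?_eq_none.mpr]
  · rfl
  · intro p hp; simpa using h p.1 p.2 hp

theorem pv_foldl_ext {α β : Type} (f g : β → α → β) (h : ∀ d i, f d i = g d i) :
    ∀ (xs : List α) (d : β), xs.foldl f d = xs.foldl g d := by
  intro xs
  induction xs with
  | nil => intro d; rfl
  | cons x xs ih => intro d; simp only [List.foldl_cons, h, ih]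

-- A's counting loop builds Counter of the third components (a missing key's getD is 0)
theorem pv_dictA_eq_counter (cond_list : List (Int × Int × String)) :
    cond_list.foldl (fun d i =>
      if d.contains i.2.2 then d.insert i.2.2 (d.getD i.2.2 0 + 1)
      else d.insert i.2.2 1) PySem.Dict.empty
    = PySem.Dict.counter (cond_list.map (fun i => i.2.2)) := by
  rw [← PySem.Dict.foldl_insert_getD_add_one_eq_counter, List.foldl_map]
  apply pv_foldl_ext
  intro d i
  by_cases h : d.contains i.2.2
  · simp [h]
  · simp only [Bool.not_eq_true] at h
    simp [h, pv_getD_of_not_contains d i.2.2 0 h]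

-- B's counting loop is the same Counter
theorem pv_dictB_eq_counter (cond_list : List (Int × Int × String)) :
    cond_list.foldl (fun d i => d.insert i.2.2 (d.getD i.2.2 0 + 1)) PySem.Dict.empty
    = PySem.Dict.counter (cond_list.map (fun i => i.2.2)) := by
  rw [← PySem.Dict.foldl_insert_getD_add_one_eq_counter, List.foldl_map]

-- stability of insertBy at the reverse comparator: every filter by key value is preserved
theorem pv_filter_insertBy {α : Type} (key : α → Int) (x : α) (v : Int) :
    ∀ ys : List α, ys.Pairwise (fun a b => key b ≤ key a) →
    (PySem.List.insertBy (fun a b => decide (key b < key a)) x ys).filter (fun y => key y == v)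
      = if key x = v then ys.filter (fun y => key y == v) ++ [x] else ys.filter (fun y => key y == v) := by
  intro ys
  induction ys with
  | nil =>
    intro _
    simp [PySem.List.insertBy]
    split_ifs with h <;> simp [h]
  | cons y ys ih =>
    intro hp
    rw [List.pairwise_cons] at hp
    obtain ⟨hy, htail⟩ := hp
    simp only [PySem.List.insertBy]
    by_cases hb : key y < key x
    · simp only [hb, decide_true, if_true]
      by_cases hv : key x = v
      · have hempty : (y :: ys).filter (fun y => key y == v) = [] := by
          rw [List.filter_eq_nil_iff]
          intro a ha
          simp only [beq_iff_eq]
          rcases List.mem_cons.mp ha with h1 | h1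
          · subst h1; omega
          · have := hy a h1; omega
        simp [hv, hempty]
      · simp [List.filter_cons, hv]
    · simp only [hb, decide_false, Bool.false_eq_true, if_false]
      rw [List.filter_cons, List.filter_cons, ih htail]
      split_ifs <;> simp

-- the stable reverse sort preserves every filter by key value
theorem pv_filter_sorted {α : Type} (key : α → Int) (xs : List α) (v : Int) :
    (PySem.List.sorted xs key true).filter (fun y => key y == v) = xs.filter (fun y => key y == v) := by
  induction xs using List.reverseRecOn with
  | nil => rfl
  | append_singleton xs x ih =>
    have h1 : PySem.List.sorted (xs ++ [x]) key true
        = PySem.List.insertBy (fun a b => decide (key b < key a)) x (PySem.List.sorted xs key true) := by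
      rw [PySem.List.sorted_rev_eq_foldl_insertBy, PySem.List.sorted_rev_eq_foldl_insertBy,
        List.foldl_append]
      rfl
    rw [h1, pv_filter_insertBy key x v _ (PySem.List.sorted_pairwise_rev xs key), List.filter_append]
    split_ifs with hv <;> simp [ih, hv]

-- uniqueness: two key-descending lists with identical filters by key value are equal
theorem pv_unique {α : Type} (key : α → Int) :
    ∀ (ys zs : List α), ys.Pairwise (fun a b => key b ≤ key a) → zs.Pairwise (fun a b => key b ≤ key a) →
    (∀ v, ys.filter (fun y => key y == v) = zs.filter (fun y => key y == v)) → ys = zs := by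
  intro ys
  induction ys with
  | nil =>
    intro zs _ _ hf
    cases zs with
    | nil => rfl
    | cons z zs =>
      have := hf (key z)
      simp at this
  | cons y ys ih =>
    intro zs hys hzs hf
    cases zs with
    | nil =>
      have := hf (key y)
      simp at this
    | cons z zs =>
      rw [List.pairwise_cons] at hys hzs
      obtain ⟨hy, hyt⟩ := hys
      obtain ⟨hz, hzt⟩ := hzs
      have m1 : y ∈ (z :: zs).filter (fun w => key w == key y) := by
        rw [← hf (key y)]; simp [List.mem_filter]
      have m2 : z ∈ (y :: ys).filter (fun w => key w == key z) := by
        rw [hf (key z)]; simp [List.mem_filter]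
      have hkey : key y = key z := by
        have l1 : key y ≤ key z := by
          rcases List.mem_cons.mp (List.mem_filter.mp m1).1 with h | h
          · rw [h]
          · exact hz y h
        have l2 : key z ≤ key y := by
          rcases List.mem_cons.mp (List.mem_filter.mp m2).1 with h | h
          · rw [h]
          · exact hy z h
        omega
      have h0 := hf (key y)
      rw [List.filter_cons, List.filter_cons] at h0
      simp only [beq_iff_eq, hkey] at h0
      have hyz : y = z := (List.cons_eq_cons.mp h0).1
      have htf : ∀ v, ys.filter (fun w => key w == v) = zs.filter (fun w => key w == v) := by
        intro v
        have := hf v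
        rw [List.filter_cons, List.filter_cons] at this
        by_cases hv : key y = v
        · have hzv : key z = v := hkey ▸ hv
          simp only [beq_iff_eq, hv, hzv] at this
          exact (List.cons_eq_cons.mp this).2
        · have hzv : ¬ key z = v := by rw [← hkey]; exact hv
          simpa [hv, hzv] using this
      rw [hyz, ih zs hyt hzt htf]

-- the bucket dict: getD c [] is the first components of the pairs whose count is c, in order
theorem pv_buckets_getD (L : List (String × Int)) :
    ∀ (b : PySem.Dict Int (List String)) (c : Int),
    (L.foldl (fun b p => b.modify p.2 ([] : List String) (fun l => l ++ [p.1])) b).getD c ([] : List String)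
      = b.getD c [] ++ (L.filter (fun p => p.2 == c)).map (fun p => p.1) := by
  induction L with
  | nil => intro b c; simp
  | cons p L ih =>
    intro b c
    rw [List.foldl_cons, ih, PySem.Dict.modify, PySem.Dict.getD_insert, List.filter_cons]
    by_cases h : c = p.2
    · simp [h]
    · have : ¬ (p.2 == c) = true := by simpa using fun hh => h hh.symm
      simp [h, this]

-- a filter of the flatMap of per-count blocks over a duplicate-free count list
theorem pv_filter_flatMap (L : List (String × Int)) :
    ∀ (cs : List Int), cs.Nodup → ∀ v : Int,
    ((cs.flatMap (fun c => L.filter (fun p => p.2 == c))).filter (fun p => p.2 == v))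
      = if v ∈ cs then L.filter (fun p => p.2 == v) else [] := by
  intro cs
  induction cs with
  | nil => simp
  | cons c cs ih =>
    intro hn v
    rw [List.nodup_cons] at hn
    rw [List.flatMap_cons, List.filter_append, List.filter_filter, ih hn.2]
    by_cases hv : v = c
    · subst hv
      simp [hn.1]
    · have h1 : ∀ p : String × Int, ¬ ((p.2 == v) && (p.2 == c)) = true := by
        intro p hp; simp at hp; omega
      simp only [List.mem_cons]
      rw [List.filter_eq_nil_iff.mpr (fun p _ => h1 p)]
      simp [hv]

-- the flatMap of per-count blocks over a strictly decreasing count list is key-descending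
theorem pv_pairwise_flatMap (L : List (String × Int)) :
    ∀ (cs : List Int), cs.Pairwise (fun a b => b < a) →
    (cs.flatMap (fun c => L.filter (fun p => p.2 == c))).Pairwise (fun a b => b.2 ≤ a.2) := by
  intro cs
  induction cs with
  | nil => simp
  | cons c cs ih =>
    intro hp
    rw [List.pairwise_cons] at hp
    rw [List.flatMap_cons]
    apply List.pairwise_append.mpr
    refine ⟨?_, ih hp.2, ?_⟩
    · apply List.pairwise_of_forall_mem_list
      intro a ha b hb
      have ha2 : a.2 = c := by simpa using (List.mem_filter.mp ha).2
      have hb2 : b.2 = c := by simpa using (List.mem_filter.mp hb).2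
      omega
    · intro a ha b hb
      have ha2 : a.2 = c := by simpa using (List.mem_filter.mp ha).2
      obtain ⟨c', hc', hbf⟩ := List.mem_flatMap.mp hb
      have hb2 : b.2 = c' := by simpa using (List.mem_filter.mp hbf).2
      have := hp.1 c' hc'
      omega

-- ===== VERDICT (by name: the statement is the Claim_ definition above) =====
theorem second_task_spec : Claim_equal_second_task := by
  intro cond_list _
  unfold Spec_second_task
  have hA : second_task cond_list
      = PySem.List.sorted ((PySem.Dict.counter (cond_list.map (fun i => i.2.2))).items) (fun p => p.2) true := by
    unfold second_task
    simp only [pv_dictA_eq_counter]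
    congr 1
    rw [pv_foldl_app, List.nil_append, PySem.Dict.items_counter]
    have hkeys : (PySem.Dict.counter (cond_list.map (fun i => i.2.2))).keys
        = PySem.Set.ofList (cond_list.map (fun i => i.2.2)) := PySem.Dict.keys_counter _
    rw [hkeys]
    apply List.map_congr_left
    intro k _
    rw [PySem.Dict.getD_counter]
  have hB : second_task_alt cond_list
      = (PySem.List.pyRange ((PySem.List.max? (((PySem.Dict.counter (cond_list.map (fun i => i.2.2))).items).map (fun p => p.2)) (fun v => v)).getD 0) 0 (-1)).flatMap
          (fun c => ((PySem.Dict.counter (cond_list.map (fun i => i.2.2))).items).filter (fun p => p.2 == c)) := by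
    unfold second_task_alt
    simp only [pv_dictB_eq_counter]
    have hbk : ∀ c : Int, (((PySem.Dict.counter (cond_list.map (fun i => i.2.2))).items).foldl
        (fun b p => b.modify p.2 ([] : List String) (fun l => l ++ [p.1])) PySem.Dict.empty).getD c ([] : List String)
          = (((PySem.Dict.counter (cond_list.map (fun i => i.2.2))).items).filter (fun p => p.2 == c)).map (fun p => p.1) := by
      intro c
      rw [pv_buckets_getD]
      simp [PySem.Dict.getD, PySem.Dict.get?, PySem.Dict.empty]
    simp only [hbk, pv_foldl_app, pv_foldl_flatMap, List.nil_append]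
    have hval : (PySem.Dict.counter (cond_list.map (fun i => i.2.2))).values
        = ((PySem.Dict.counter (cond_list.map (fun i => i.2.2))).items).map (fun p => p.2) := rfl
    rw [hval]
    apply List.flatMap_congr
    intro c _
    rw [List.map_map]
    have hmem : ∀ p ∈ ((PySem.Dict.counter (cond_list.map (fun i => i.2.2))).items).filter (fun p => p.2 == c),
        ((fun k => (k, c)) ∘ (fun p : String × Int => p.1)) p = p := by
      intro p hp
      have h2 : p.2 = c := by simpa using (List.mem_filter.mp hp).2
      simp [Function.comp, ← h2]
    rw [List.map_congr_left hmem]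
    simp
  rw [hA, hB]
  -- notation
  generalize hLdef : (PySem.Dict.counter (cond_list.map (fun i => i.2.2))).items = L at *
  have hcsrev : PySem.List.pyRange ((PySem.List.max? (L.map (fun p => p.2)) (fun v => v)).getD 0) 0 (-1)
      = (PySem.List.pyRange 1 (((PySem.List.max? (L.map (fun p => p.2)) (fun v => v)).getD 0) + 1) 1).reverse := by
    rw [PySem.List.pyRange_neg_one_eq_reverse]
    norm_num
  have hnodup : (PySem.List.pyRange ((PySem.List.max? (L.map (fun p => p.2)) (fun v => v)).getD 0) 0 (-1)).Nodup := by
    rw [hcsrev]; exact List.nodup_reverse.mpr (PySem.List.nodup_pyRange_one _ _)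
  have hdesc : (PySem.List.pyRange ((PySem.List.max? (L.map (fun p => p.2)) (fun v => v)).getD 0) 0 (-1)).Pairwise (fun a b => b < a) := by
    rw [hcsrev]
    exact List.pairwise_reverse.mpr (PySem.List.pairwise_lt_pyRange_one _ _)
  apply pv_unique (fun p : String × Int => p.2)
  · exact PySem.List.sorted_pairwise_rev _ _
  · exact pv_pairwise_flatMap L _ hdesc
  · intro v
    rw [pv_filter_sorted, pv_filter_flatMap L _ hnodup v]
    by_cases hv : v ∈ PySem.List.pyRange ((PySem.List.max? (L.map (fun p => p.2)) (fun v => v)).getD 0) 0 (-1)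
    · rw [if_pos hv]
    · rw [if_neg hv]
      rw [List.filter_eq_nil_iff]
      intro p hp hbeq
      have hpv : p.2 = v := by simpa using hbeq
      apply hv
      rw [PySem.List.mem_pyRange_neg_one]
      -- p.2 is positive (it is a count of a present element) and at most the max of the counts
      have hmem2 : p.2 ∈ L.map (fun p : String × Int => p.2) := List.mem_map.mpr ⟨p, hp, rfl⟩
      have hpos : 0 < p.2 := by
        rw [← hLdef, PySem.Dict.items_counter] at hp
        obtain ⟨k, hk, hpk⟩ := List.mem_map.mp hp
        rw [PySem.Set.mem_ofList] at hk
        have : 0 < (cond_list.map (fun i => i.2.2)).count k := List.count_pos_iff.mpr hk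
        have hp2 : p.2 = ((cond_list.map (fun i => i.2.2)).count k : Int) := by rw [← hpk]
        omega
      cases hmax : PySem.List.max? (L.map (fun p : String × Int => p.2)) (fun v => v) with
      | none =>
        rw [PySem.List.max?_eq_none_iff] at hmax
        rw [hmax] at hmem2
        simp at hmem2
      | some m0 =>
        have := PySem.List.max?_isMax hmax p.2 hmem2
        simp only [Option.getD_some]
        omega
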